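-- pv_equiv track=rewrite | github.com/vinceeverton/bulliQ | backend/app/services/checkout_engine.py | best_checkout
-- ===== SOURCE A (Python) =====
-- CHECKOUTS = {
--     170: ["T20", "T20", "BULL"],
--     167: ["T20", "T19", "BULL"],
--     164: ["T20", "T18", "BULL"],
--     161: ["T20", "T17", "BULL"],
--     40: ["D20"],
--     32: ["D16"],
--     24: ["D12"],
--     16: ["D8"],
--     8: ["D4"],
--     2: ["D1"],
-- }
--
-- def best_checkout(remaining: int, double_stats: dict):
--     if remaining in CHECKOUTS:
--         return CHECKOUTS[remaining]
--
--     # fallback logic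
--     for d in sorted(double_stats, key=double_stats.get, reverse=True):
--         value = int(d.replace("D", "")) * 2
--         if remaining - value >= 0:
--             return [d]
--
--     return ["No checkout"]
-- ===== SOURCE B (Python) =====
-- CHECKOUTS = {
--     170: ["T20", "T20", "BULL"],
--     167: ["T20", "T19", "BULL"],
--     164: ["T20", "T18", "BULL"],
--     161: ["T20", "T17", "BULL"],
--     40: ["D20"],
--     32: ["D16"],
--     24: ["D12"],
--     16: ["D8"],
--     8: ["D4"],
--     2: ["D1"],
-- }
--
-- def best_checkout(remaining: int, double_stats: dict):
--     if remaining in CHECKOUTS: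
--         return CHECKOUTS[remaining]
--
--     # single pass instead of sorting: keep the feasible double with the
--     # highest stat; strict '>' keeps the first one in iteration order on ties,
--     # which is what the stable descending sort yields.
--     best = None
--     best_stat = None
--     for d, stat in double_stats.items():
--         value = int(d.replace("D", "")) * 2
--         if remaining - value >= 0 and (best is None or stat > best_stat):
--             best = d
--             best_stat = stat
--
--     return [best] if best is not None else ["No checkout"]
-- ===== Notes on version B (the rewrite author's own statement) =====
-- stated objective: simpler
-- what changed: Replaces the stable descending sort plus first-feasible scan by a single pass over the dict items that keeps the feasible double with the strictly highest stat (strict '>' reproduces the stable sort's tie-breaking).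
-- outside the precondition, e.g. on best_checkout(100, {'D20': 5, 'XX': 1}): A returns ['D20'], B raises ValueError
import Mathlib
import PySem

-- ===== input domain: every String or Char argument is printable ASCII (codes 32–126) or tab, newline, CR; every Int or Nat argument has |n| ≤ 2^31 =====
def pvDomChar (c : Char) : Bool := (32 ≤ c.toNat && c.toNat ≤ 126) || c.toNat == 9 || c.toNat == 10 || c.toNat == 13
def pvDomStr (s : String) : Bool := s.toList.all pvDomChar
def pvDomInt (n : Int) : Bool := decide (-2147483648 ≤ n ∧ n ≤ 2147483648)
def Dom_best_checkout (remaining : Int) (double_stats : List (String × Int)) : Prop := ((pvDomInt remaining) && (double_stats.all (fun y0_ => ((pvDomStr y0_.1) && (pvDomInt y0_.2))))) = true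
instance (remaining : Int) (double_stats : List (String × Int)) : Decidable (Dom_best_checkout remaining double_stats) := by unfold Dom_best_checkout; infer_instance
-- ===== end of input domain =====

-- B replaces A's stable descending sort + first-feasible scan by one pass keeping the
-- feasible double with the strictly highest stat (objective: simpler, no sort).


-- ===== PORT A =====
-- the module-level CHECKOUTS dict (shared data, used verbatim by both Pythons)
def pvCheckouts : List (Int × List String) :=
  [(170, ["T20", "T20", "BULL"]), (167, ["T20", "T19", "BULL"]),
   (164, ["T20", "T18", "BULL"]), (161, ["T20", "T17", "BULL"]),
   (40, ["D20"]), (32, ["D16"]), (24, ["D12"]), (16, ["D8"]), (8, ["D4"]), (2, ["D1"])]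

-- int(d.replace("D", "")); `none` is Python's ValueError, excluded by Pre_, so the
-- `getD 0` default is never reached on admitted inputs (both ports use this helper)
def pvParse (d : String) : Int :=
  (PySem.Int.ofStr? (PySem.Str.replace d "D" "")).getD 0

-- double_stats.get d (the sort key); every d sorted comes from the dict, so the
-- `getD 0` default for a missing key is never reached
def pvStat (double_stats : List (String × Int)) (d : String) : Int :=
  ((double_stats.find? (fun p => p.1 == d)).map Prod.snd).getD 0

def best_checkout (remaining : Int) (double_stats : List (String × Int)) : List String :=
  match pvCheckouts.find? (fun p => p.1 == remaining) with
  | some p => p.2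
  | none =>
    -- for d in sorted(double_stats, key=double_stats.get, reverse=True): first hit returns
    match (PySem.List.sorted (double_stats.map Prod.fst) (pvStat double_stats) true).find?
        (fun d => decide (0 ≤ remaining - pvParse d * 2)) with
    | some d => [d]
    | none => ["No checkout"]

-- ===== PORT B =====
def best_checkout_alt (remaining : Int) (double_stats : List (String × Int)) : List String :=
  match pvCheckouts.find? (fun p => p.1 == remaining) with
  | some p => p.2
  | none =>
    -- single pass over the items, keeping (best, best_stat) with a strict '>'
    match double_stats.foldl
        (fun best p =>
          if decide (0 ≤ remaining - pvParse p.1 * 2) &&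
              (match best with | none => true | some q => decide (q.2 < p.2))
          then some p else best)
        (none : Option (String × Int)) with
    | some p => [p.1]
    | none => ["No checkout"]

-- ===== PRECONDITION & SPEC =====
-- Pre_ excludes (a) duplicate-key lists, which represent no Python dict, and (b) fallback
-- inputs with a key on which int(d.replace("D","")) raises ValueError: there A raises,
-- or accidentally returns when a feasible key sorts before the malformed one, while B
-- (which inspects every item) raises.
def Pre_best_checkout (remaining : Int) (double_stats : List (String × Int)) : Prop :=
  (pvCheckouts.find? (fun p => p.1 == remaining)).isSome = true ∨
  ((double_stats.map Prod.fst).Nodup ∧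
    ∀ p ∈ double_stats, (PySem.Int.ofStr? (PySem.Str.replace p.1 "D" "")).isSome = true)
instance (remaining : Int) (double_stats : List (String × Int)) : Decidable (Pre_best_checkout remaining double_stats) := by unfold Pre_best_checkout; infer_instance

def pvWitness_best_checkout : Int × (List (String × Int)) := (100, [("D20", 5), ("D16", 3)])

def Spec_best_checkout (remaining : Int) (double_stats : List (String × Int)) (out : List String) : Prop := out = best_checkout_alt remaining double_stats
instance (remaining : Int) (double_stats : List (String × Int)) (out : List String) : Decidable (Spec_best_checkout remaining double_stats out) := by unfold Spec_best_checkout; infer_instance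

-- ===== CLAIM (what is proved, stated in full; the proofs are below) =====
def Claim_equal_best_checkout : Prop := ∀ (remaining : Int) (double_stats : List (String × Int)), Dom_best_checkout remaining double_stats → Pre_best_checkout remaining double_stats → Spec_best_checkout remaining double_stats (best_checkout remaining double_stats)

-- ===== LEMMAS AND PROOFS =====

-- one step of B's running-best loop, abstracted over the predicate and the key
def pvStep {α : Type} (pred : α → Bool) (key : α → Int) (o : Option α) (x : α) : Option α :=
  if pred x && (match o with | none => true | some m => decide (key m < key x)) then some x else o

lemma pv_find_insertBy {α : Type} (pred : α → Bool) (key : α → Int) (x : α) (s : List α)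
    (hs : s.Pairwise (fun a b => key b ≤ key a)) :
    (PySem.List.insertBy (fun a b => decide (key b < key a)) x s).find? pred
      = pvStep pred key (s.find? pred) x := by
  induction s with
  | nil =>
    simp [PySem.List.insertBy, pvStep, List.find?]
  | cons y ys ih =>
    have hys : ys.Pairwise (fun a b => key b ≤ key a) := hs.tail
    by_cases hxy : key y < key x
    · -- x is inserted in front of y
      simp only [PySem.List.insertBy, hxy, decide_true, if_true]
      by_cases hpx : pred x = true
      · -- LHS = some x; show the step also yields some x
        rcases hfy : (y :: ys).find? pred with _ | m
        · simp [List.find?, hpx, pvStep]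
        · have hm : m ∈ y :: ys := List.mem_of_find?_eq_some hfy
          have hmy : key m ≤ key y := by
            rcases List.mem_cons.1 hm with rfl | hm'
            · exact le_refl _
            · exact (List.pairwise_cons.1 hs).1 m hm'
          have : key m < key x := lt_of_le_of_lt hmy hxy
          simp [List.find?, hpx, pvStep, this]
      · have hpx' : pred x = false := by simpa using hpx
        simp [List.find?, hpx', pvStep]
    · -- key x ≤ key y : x goes further down
      simp only [PySem.List.insertBy, hxy, decide_false]
      by_cases hpy : pred y = true
      · have : decide (key y < key x) = false := by simpa using hxy
        simp [List.find?, hpy, pvStep, this]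
      · have hpy' : pred y = false := by simpa using hpy
        simp [List.find?, hpy', ih hys]

lemma pv_sortedRev_find_eq_foldl {α : Type} (pred : α → Bool) (key : α → Int) (l : List α) :
    (PySem.List.sorted l key true).find? pred = l.foldl (pvStep pred key) none := by
  induction l using List.reverseRecOn with
  | nil =>
    rw [PySem.List.sorted_rev_eq_foldl_insertBy]
    rfl
  | append_singleton l x ih =>
    rw [PySem.List.sorted_rev_eq_foldl_insertBy, List.foldl_append]
    simp only [List.foldl_cons, List.foldl_nil]
    rw [← PySem.List.sorted_rev_eq_foldl_insertBy,
      pv_find_insertBy pred key x _ (PySem.List.sorted_pairwise_rev l key), ih,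
      List.foldl_append]
    simp only [List.foldl_cons, List.foldl_nil]

-- with distinct keys, the dict lookup on a member pair returns its own value
lemma pv_stat_of_mem (l : List (String × Int)) (h : (l.map Prod.fst).Nodup)
    (p : String × Int) (hp : p ∈ l) : pvStat l p.1 = p.2 := by
  induction l with
  | nil => cases hp
  | cons q t ih =>
    rcases List.mem_cons.1 hp with rfl | hp'
    · simp [pvStat, List.find?]
    · have h' : q.1 ∉ t.map Prod.fst ∧ (t.map Prod.fst).Nodup :=
        List.nodup_cons.1 (by simpa using h)
      have hq : (q.1 == p.1) = false := by
        have h1 : p.1 ∈ t.map Prod.fst := List.mem_map.2 ⟨p, hp', rfl⟩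
        simp only [beq_eq_false_iff_ne, ne_eq]
        intro he; rw [he] at h'; exact h'.1 h1
      simpa [pvStat, List.find?, hq] using ih h'.2 hp'

-- the relation carried through the two loops: B's state holds the pair, A's the key
def pvRel (key : String → Int) (o : Option (String × Int)) (o' : Option String) : Prop :=
  match o, o' with
  | none, none => True
  | some p, some d => d = p.1 ∧ key p.1 = p.2
  | _, _ => False

lemma pv_bridge (remaining : Int) (key : String → Int)
    (l : List (String × Int)) (hk : ∀ p ∈ l, key p.1 = p.2) :
    ∀ (o : Option (String × Int)) (o' : Option String), pvRel key o o' →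
    pvRel key
      (l.foldl (fun best p =>
          if decide (0 ≤ remaining - pvParse p.1 * 2) &&
              (match best with | none => true | some q => decide (q.2 < p.2))
          then some p else best) o)
      (l.foldl (fun o p => pvStep (fun d => decide (0 ≤ remaining - pvParse d * 2)) key o p.1) o') := by
  induction l with
  | nil => intro o o' h; exact h
  | cons p t ih =>
    intro o o' h
    have hkp : key p.1 = p.2 := hk p List.mem_cons_self
    have hkt : ∀ q ∈ t, key q.1 = q.2 := fun q hq => hk q (List.mem_cons_of_mem _ hq)
    refine ih hkt _ _ ?_
    rcases o with _ | q <;> rcases o' with _ | d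
    · show pvRel key
        (if (decide (0 ≤ remaining - pvParse p.1 * 2) && true) = true then some p else none)
        (if (decide (0 ≤ remaining - pvParse p.1 * 2) && true) = true then some p.1 else none)
      split_ifs with hc
      · exact ⟨rfl, hkp⟩
      · trivial
    · exact absurd h (by simp [pvRel])
    · exact absurd h (by simp [pvRel])
    · obtain ⟨rfl, hkq⟩ : d = q.1 ∧ key q.1 = q.2 := h
      show pvRel key
        (if (decide (0 ≤ remaining - pvParse p.1 * 2) && decide (q.2 < p.2)) = true
          then some p else some q)
        (if (decide (0 ≤ remaining - pvParse p.1 * 2) && decide (key q.1 < key p.1)) = true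
          then some p.1 else some q.1)
      rw [hkq, hkp]
      split_ifs with hc
      · exact ⟨rfl, hkp⟩
      · exact ⟨rfl, hkq⟩

-- ===== VERDICT (by name: the statement is the Claim_ definition above) =====
theorem best_checkout_spec : Claim_equal_best_checkout := by
  intro remaining double_stats _ hpre
  unfold Spec_best_checkout best_checkout best_checkout_alt
  rcases hco : pvCheckouts.find? (fun p => p.1 == remaining) with _ | v
  · -- fallback: A's sorted scan = B's single pass
    have hnd : (double_stats.map Prod.fst).Nodup ∧
        ∀ p ∈ double_stats, (PySem.Int.ofStr? (PySem.Str.replace p.1 "D" "")).isSome = true := by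
      rcases hpre with hpre | hpre
      · rw [hco] at hpre; simp at hpre
      · exact hpre
    have hk : ∀ p ∈ double_stats, pvStat double_stats p.1 = p.2 :=
      fun p hp => pv_stat_of_mem double_stats hnd.1 p hp
    have hfind := pv_sortedRev_find_eq_foldl
      (fun d => decide (0 ≤ remaining - pvParse d * 2)) (pvStat double_stats)
      (double_stats.map Prod.fst)
    rw [List.foldl_map] at hfind
    have hrel := pv_bridge remaining (pvStat double_stats) double_stats hk none none
      (by simp [pvRel])
    simp only [hco]
    rw [hfind]
    rcases hb : double_stats.foldl (fun best p =>
        if decide (0 ≤ remaining - pvParse p.1 * 2) &&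
            (match best with | none => true | some q => decide (q.2 < p.2))
        then some p else best) none with _ | p <;>
      rcases ha : double_stats.foldl (fun o p =>
          pvStep (fun d => decide (0 ≤ remaining - pvParse d * 2)) (pvStat double_stats) o p.1)
          none with _ | d <;>
      rw [hb, ha] at hrel
    · rw [hb, ha]
    · exact absurd hrel (by simp [pvRel])
    · exact absurd hrel (by simp [pvRel])
    · obtain ⟨rfl, -⟩ : d = p.1 ∧ pvStat double_stats p.1 = p.2 := hrel
      rw [hb, ha]
  · simp [hco]
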